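-- pv_equiv track=rewrite | github.com/zengjiahang/ai_web | mynewproject/imageprocessor/views.py | format_features_to_table
-- ===== SOURCE A (Python) =====
-- def format_features_to_table(features):
--     """
--     将特征数量格式化为表格形式
--
--     Args:
--         features: 特征数量字典 {'slot': 2, 'hole': 4, 'chamfer': 1, 'shoulder': 0, 'step': 1}
--
--     Returns:
--         list: 表格行数据，每行包含 [Feature, Operation, Prior operations]
--     """
--     table_rows = []
--     feature_counter = 1
--
--     slot_count = features.get('slot', 0)
--     for i in range(slot_count):
--         feature_name = f'F{feature_counter}'
--         table_rows.append([feature_name, 'milling', 'none'])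
--         table_rows.append([feature_name, 'milling', 'none'])
--         feature_counter += 1
--
--     hole_count = features.get('hole', 0)
--     for i in range(hole_count):
--         feature_name = f'F{feature_counter}'
--         PRIOR_ALL = 'centre drilling, drilling, milling'
--         PRIOR_TWO = 'centre drilling, milling'
--         table_rows.append([feature_name, 'milling', PRIOR_ALL])
--         table_rows.append([feature_name, 'drilling', PRIOR_TWO])
--         table_rows.append([feature_name, 'centre drilling', 'milling'])
--         feature_counter += 1
--
--     chamfer_count = features.get('chamfer', 0)
--     for i in range(chamfer_count):
--         feature_name = f'F{feature_counter}'
--         table_rows.append([feature_name, 'milling', 'none'])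
--         table_rows.append([feature_name, 'milling', 'none'])  # 第二行也是none，通过后台chamferFeatures列表识别
--         feature_counter += 1
--
--     shoulder_count = features.get('shoulder', 0)
--     for i in range(shoulder_count):
--         feature_name = f'F{feature_counter}'
--         table_rows.append([feature_name, 'milling', 'none'])
--         table_rows.append([feature_name, 'milling', 'none'])
--         feature_counter += 1
--
--     step_count = features.get('step', 0)
--     for i in range(step_count):
--         feature_name = f'F{feature_counter}'
--         table_rows.append([feature_name, 'milling', 'none'])
--         table_rows.append([feature_name, 'milling', 'none'])
--         feature_counter += 1
--
--     return table_rows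
-- ===== SOURCE B (Python) =====
-- def format_features_to_table(features):
--     # All non-hole feature types emit the identical pair of milling/none rows,
--     # so a feature's rows depend only on whether its sequential number falls
--     # inside the hole band.  Enumerate feature numbers 1..total in one flat
--     # loop and classify each by an interval test instead of per-type loops.
--     hole_lo = max(features.get('slot', 0), 0)
--     hole_hi = hole_lo + max(features.get('hole', 0), 0)
--     total = hole_hi + sum(max(features.get(k, 0), 0)
--                           for k in ('chamfer', 'shoulder', 'step'))
--     rows = []
--     for n in range(1, total + 1):
--         name = f'F{n}'
--         if hole_lo < n <= hole_hi:
--             rows += [[name, 'milling', 'centre drilling, drilling, milling'],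
--                      [name, 'drilling', 'centre drilling, milling'],
--                      [name, 'centre drilling', 'milling']]
--         else:
--             rows += [[name, 'milling', 'none'], [name, 'milling', 'none']]
--     return rows
-- ===== Notes on version B (the rewrite author's own statement) =====
-- stated objective: alternative
-- what changed: Instead of five per-type loops threading a counter, B computes the hole band boundaries up front and runs one flat loop over feature numbers 1..total, classifying each number by an interval test (all non-hole types emit identical rows).
import Mathlib
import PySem

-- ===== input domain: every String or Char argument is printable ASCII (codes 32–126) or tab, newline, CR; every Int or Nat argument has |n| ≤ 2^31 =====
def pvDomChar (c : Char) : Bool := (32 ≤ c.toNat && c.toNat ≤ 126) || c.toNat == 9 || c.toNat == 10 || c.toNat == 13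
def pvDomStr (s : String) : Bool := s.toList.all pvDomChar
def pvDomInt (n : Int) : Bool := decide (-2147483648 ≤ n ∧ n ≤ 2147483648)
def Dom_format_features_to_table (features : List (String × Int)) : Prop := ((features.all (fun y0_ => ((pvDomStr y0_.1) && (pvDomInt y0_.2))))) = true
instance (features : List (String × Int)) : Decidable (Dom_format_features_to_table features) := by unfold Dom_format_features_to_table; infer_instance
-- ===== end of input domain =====

-- B replaces A's five per-type counter-threading loops by one flat loop over feature numbers 1..total with an interval test for the hole band (objective: alternative; same cost).


-- ===== PORT A =====
def format_features_to_table (features : List (String × Int)) : List (List String) :=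
  let slot_count := PySem.Dict.getD (PySem.Dict.ofList features) "slot" 0
  let st1 := (PySem.List.pyRange 0 slot_count 1).foldl (fun (st : List (List String) × Int) _ =>
    let feature_name := "F" ++ PySem.Int.toStr st.2
    (st.1 ++ [[feature_name, "milling", "none"], [feature_name, "milling", "none"]], st.2 + 1))
    ([], 1)
  let hole_count := PySem.Dict.getD (PySem.Dict.ofList features) "hole" 0
  let st2 := (PySem.List.pyRange 0 hole_count 1).foldl (fun (st : List (List String) × Int) _ =>
    let feature_name := "F" ++ PySem.Int.toStr st.2
    (st.1 ++ [[feature_name, "milling", "centre drilling, drilling, milling"],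
              [feature_name, "drilling", "centre drilling, milling"],
              [feature_name, "centre drilling", "milling"]], st.2 + 1))
    st1
  let chamfer_count := PySem.Dict.getD (PySem.Dict.ofList features) "chamfer" 0
  let st3 := (PySem.List.pyRange 0 chamfer_count 1).foldl (fun (st : List (List String) × Int) _ =>
    let feature_name := "F" ++ PySem.Int.toStr st.2
    (st.1 ++ [[feature_name, "milling", "none"], [feature_name, "milling", "none"]], st.2 + 1))
    st2
  let shoulder_count := PySem.Dict.getD (PySem.Dict.ofList features) "shoulder" 0
  let st4 := (PySem.List.pyRange 0 shoulder_count 1).foldl (fun (st : List (List String) × Int) _ =>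
    let feature_name := "F" ++ PySem.Int.toStr st.2
    (st.1 ++ [[feature_name, "milling", "none"], [feature_name, "milling", "none"]], st.2 + 1))
    st3
  let step_count := PySem.Dict.getD (PySem.Dict.ofList features) "step" 0
  let st5 := (PySem.List.pyRange 0 step_count 1).foldl (fun (st : List (List String) × Int) _ =>
    let feature_name := "F" ++ PySem.Int.toStr st.2
    (st.1 ++ [[feature_name, "milling", "none"], [feature_name, "milling", "none"]], st.2 + 1))
    st4
  st5.1

-- ===== PORT B =====
def format_features_to_table_alt (features : List (String × Int)) : List (List String) :=
  let hole_lo := max (PySem.Dict.getD (PySem.Dict.ofList features) "slot" 0) 0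
  let hole_hi := hole_lo + max (PySem.Dict.getD (PySem.Dict.ofList features) "hole" 0) 0
  let total := hole_hi + (["chamfer", "shoulder", "step"].map
    (fun k => max (PySem.Dict.getD (PySem.Dict.ofList features) k 0) 0)).sum
  (PySem.List.pyRange 1 (total + 1) 1).foldl (fun (rows : List (List String)) n =>
    let name := "F" ++ PySem.Int.toStr n
    if hole_lo < n ∧ n ≤ hole_hi then
      rows ++ [[name, "milling", "centre drilling, drilling, milling"],
               [name, "drilling", "centre drilling, milling"],
               [name, "centre drilling", "milling"]]
    else
      rows ++ [[name, "milling", "none"], [name, "milling", "none"]]) []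

-- ===== PRECONDITION & SPEC =====
def Spec_format_features_to_table (features : List (String × Int)) (out : List (List String)) : Prop := out = format_features_to_table_alt features
instance (features : List (String × Int)) (out : List (List String)) : Decidable (Spec_format_features_to_table features out) := by unfold Spec_format_features_to_table; infer_instance

-- ===== CLAIM (what is proved, stated in full; the proofs are below) =====
def Claim_equal_format_features_to_table : Prop := ∀ (features : List (String × Int)), Dom_format_features_to_table features → Spec_format_features_to_table features (format_features_to_table features)

-- ===== LEMMAS AND PROOFS =====

lemma pv_iterNat (block : Int → List (List String)) (n : Nat) :
    ∀ (rows : List (List String)) (c : Int),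
    (List.range n).foldl (fun (st : List (List String) × Int) (_ : Nat) => (st.1 ++ block st.2, st.2 + 1)) (rows, c)
    = (rows ++ (List.range n).flatMap (fun (j : Nat) => block (c + (j : Int))), c + n) := by
  induction n with
  | zero => simp
  | succ n ih =>
    intro rows c
    rw [List.range_succ, List.foldl_append, List.flatMap_append, ih]
    simp
    omega

lemma pv_iterA (block : Int → List (List String)) (k : Int) (rows : List (List String)) (c : Int) :
    (PySem.List.pyRange 0 k 1).foldl (fun (st : List (List String) × Int) (_ : Int) => (st.1 ++ block st.2, st.2 + 1)) (rows, c)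
    = (rows ++ (List.range k.toNat).flatMap (fun (j : Nat) => block (c + (j : Int))), c + k.toNat) := by
  rw [PySem.List.pyRange_one, List.foldl_map, pv_iterNat]
  simp

def pvRowsN (c : Int) : List (List String) :=
  [["F" ++ PySem.Int.toStr c, "milling", "none"], ["F" ++ PySem.Int.toStr c, "milling", "none"]]
def pvRowsH (c : Int) : List (List String) :=
  [["F" ++ PySem.Int.toStr c, "milling", "centre drilling, drilling, milling"],
   ["F" ++ PySem.Int.toStr c, "drilling", "centre drilling, milling"],
   ["F" ++ PySem.Int.toStr c, "centre drilling", "milling"]]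

lemma pv_iterN (k : Int) (rows : List (List String)) (c : Int) :
    (PySem.List.pyRange 0 k 1).foldl (fun (st : List (List String) × Int) (_ : Int) =>
      (st.1 ++ [["F" ++ PySem.Int.toStr st.2, "milling", "none"], ["F" ++ PySem.Int.toStr st.2, "milling", "none"]], st.2 + 1)) (rows, c)
    = (rows ++ (List.range k.toNat).flatMap (fun (j : Nat) => pvRowsN (c + (j : Int))), c + k.toNat) :=
  pv_iterA (fun c => [["F" ++ PySem.Int.toStr c, "milling", "none"], ["F" ++ PySem.Int.toStr c, "milling", "none"]]) k rows c

lemma pv_iterH (k : Int) (rows : List (List String)) (c : Int) :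
    (PySem.List.pyRange 0 k 1).foldl (fun (st : List (List String) × Int) (_ : Int) =>
      (st.1 ++ [["F" ++ PySem.Int.toStr st.2, "milling", "centre drilling, drilling, milling"],
                ["F" ++ PySem.Int.toStr st.2, "drilling", "centre drilling, milling"],
                ["F" ++ PySem.Int.toStr st.2, "centre drilling", "milling"]], st.2 + 1)) (rows, c)
    = (rows ++ (List.range k.toNat).flatMap (fun (j : Nat) => pvRowsH (c + (j : Int))), c + k.toNat) :=
  pv_iterA (fun c => [["F" ++ PySem.Int.toStr c, "milling", "centre drilling, drilling, milling"],
                      ["F" ++ PySem.Int.toStr c, "drilling", "centre drilling, milling"],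
                      ["F" ++ PySem.Int.toStr c, "centre drilling", "milling"]]) k rows c
def pvSpine (s h ch sh st : Nat) : List (List String) :=
  (List.range s).flatMap (fun (j : Nat) => pvRowsN (1 + (j : Int)))
  ++ (List.range h).flatMap (fun (j : Nat) => pvRowsH (1 + (s : Int) + (j : Int)))
  ++ (List.range ch).flatMap (fun (j : Nat) => pvRowsN (1 + (s : Int) + (h : Int) + (j : Int)))
  ++ (List.range sh).flatMap (fun (j : Nat) => pvRowsN (1 + (s : Int) + (h : Int) + (ch : Int) + (j : Int)))
  ++ (List.range st).flatMap (fun (j : Nat) => pvRowsN (1 + (s : Int) + (h : Int) + (ch : Int) + (sh : Int) + (j : Int)))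

lemma pv_flatMap_congr {α β : Type} (l : List α) (f g : α → List β)
    (h : ∀ x ∈ l, f x = g x) : l.flatMap f = l.flatMap g := by
  induction l with
  | nil => rfl
  | cons a t ih =>
    simp only [List.flatMap_cons]
    rw [h a (by simp), ih (fun x hx => h x (by simp [hx]))]

lemma pv_flatMap_pyRange {β : Type} (a b : Int) (f : Int → List β) :
    (PySem.List.pyRange a b 1).flatMap f
    = (List.range (b - a).toNat).flatMap (fun (j : Nat) => f (a + (j : Int))) := by
  rw [PySem.List.pyRange_one, List.flatMap_map]

-- a flatMap segment of constant classification, shifted to Nat range form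
lemma pv_seg {β : Type} (a b : Int) (f g : Int → List β) (n : Nat)
    (hn : (b - a).toNat = n) (h : ∀ x, a ≤ x → x < b → f x = g x) :
    (PySem.List.pyRange a b 1).flatMap f
    = (List.range n).flatMap (fun (j : Nat) => g (a + (j : Int))) := by
  rw [pv_flatMap_congr _ f g (fun x hx => by
        rw [PySem.List.mem_pyRange_one] at hx; exact h x hx.1 hx.2),
      pv_flatMap_pyRange, hn]

lemma pv_B_spine (s h ch sh st : Nat) :
    (PySem.List.pyRange 1 ((s : Int) + h + ch + sh + st + 1) 1).flatMap
      (fun n => if (s : Int) < n ∧ n ≤ (s : Int) + h then pvRowsH n else pvRowsN n)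
    = pvSpine s h ch sh st := by
  rw [PySem.List.pyRange_one_append 1 (1 + (s : Int)) _ (by omega) (by omega),
      PySem.List.pyRange_one_append (1 + (s : Int)) (1 + (s : Int) + h) _ (by omega) (by omega),
      PySem.List.pyRange_one_append (1 + (s : Int) + h) (1 + (s : Int) + h + ch) _ (by omega) (by omega),
      PySem.List.pyRange_one_append (1 + (s : Int) + h + ch) (1 + (s : Int) + h + ch + sh) _ (by omega) (by omega)]
  simp only [List.flatMap_append]
  rw [pv_seg _ _ _ pvRowsN s (by omega) (fun x h1 h2 => if_neg (by omega)),
      pv_seg _ _ _ pvRowsH h (by omega) (fun x h1 h2 => if_pos (by omega)),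
      pv_seg _ _ _ pvRowsN ch (by omega) (fun x h1 h2 => if_neg (by omega)),
      pv_seg _ _ _ pvRowsN sh (by omega) (fun x h1 h2 => if_neg (by omega)),
      pv_seg _ _ _ pvRowsN st (by omega) (fun x h1 h2 => if_neg (by omega))]
  simp only [pvSpine, List.append_assoc]

lemma pv_A_char (features : List (String × Int)) :
    format_features_to_table features
    = pvSpine (PySem.Dict.getD (PySem.Dict.ofList features) "slot" 0).toNat
              (PySem.Dict.getD (PySem.Dict.ofList features) "hole" 0).toNat
              (PySem.Dict.getD (PySem.Dict.ofList features) "chamfer" 0).toNat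
              (PySem.Dict.getD (PySem.Dict.ofList features) "shoulder" 0).toNat
              (PySem.Dict.getD (PySem.Dict.ofList features) "step" 0).toNat := by
  simp only [format_features_to_table]
  rw [pv_iterN, pv_iterH, pv_iterN, pv_iterN, pv_iterN]
  simp only [pvSpine, List.nil_append, List.append_assoc]

lemma pv_B_char (features : List (String × Int)) :
    format_features_to_table_alt features
    = pvSpine (PySem.Dict.getD (PySem.Dict.ofList features) "slot" 0).toNat
              (PySem.Dict.getD (PySem.Dict.ofList features) "hole" 0).toNat
              (PySem.Dict.getD (PySem.Dict.ofList features) "chamfer" 0).toNat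
              (PySem.Dict.getD (PySem.Dict.ofList features) "shoulder" 0).toNat
              (PySem.Dict.getD (PySem.Dict.ofList features) "step" 0).toNat := by
  simp only [format_features_to_table_alt, List.map_cons, List.map_nil, List.sum_cons,
    List.sum_nil, ← Int.toNat_eq_max]
  set s := (PySem.Dict.getD (PySem.Dict.ofList features) "slot" 0).toNat with hs
  set h := (PySem.Dict.getD (PySem.Dict.ofList features) "hole" 0).toNat with hh
  set ch := (PySem.Dict.getD (PySem.Dict.ofList features) "chamfer" 0).toNat with hch
  set sh := (PySem.Dict.getD (PySem.Dict.ofList features) "shoulder" 0).toNat with hsh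
  set st := (PySem.Dict.getD (PySem.Dict.ofList features) "step" 0).toNat with hst
  have hfun : (fun (rows : List (List String)) (n : Int) =>
      if (s : Int) < n ∧ n ≤ (s : Int) + (h : Int) then
        rows ++ [["F" ++ PySem.Int.toStr n, "milling", "centre drilling, drilling, milling"],
                 ["F" ++ PySem.Int.toStr n, "drilling", "centre drilling, milling"],
                 ["F" ++ PySem.Int.toStr n, "centre drilling", "milling"]]
      else
        rows ++ [["F" ++ PySem.Int.toStr n, "milling", "none"], ["F" ++ PySem.Int.toStr n, "milling", "none"]])
      = (fun (rows : List (List String)) (n : Int) =>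
          rows ++ if (s : Int) < n ∧ n ≤ (s : Int) + (h : Int) then pvRowsH n else pvRowsN n) := by
    funext rows n
    split_ifs <;> simp [pvRowsH, pvRowsN]
  rw [hfun, PySem.List.foldl_append_eq_flatMap]
  rw [show ((s : Int) + h + ((ch : Int) + ((sh : Int) + ((st : Int) + 0))) + 1)
      = ((s : Int) + h + ch + sh + st + 1) from by ring]
  rw [List.nil_append, pv_B_spine]

-- ===== VERDICT (by name: the statement is the Claim_ definition above) =====
theorem format_features_to_table_spec : Claim_equal_format_features_to_table := by
  intro features _
  unfold Spec_format_features_to_table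
  rw [pv_A_char, pv_B_char]
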